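-- pv_equiv track=rewrite | github.com/AkiLotus/pov-conversion | vietnamese_data/pos_supplied/indirect_generator.py | split_contents
-- ===== SOURCE A (Python) =====
-- def split_contents(word_list, tag_list, tag_string):
-- 	verb_begin, content_tags, content = None, None, None
--
-- 	verb_begin = None
-- 	content_tags = tag_list
-- 	content = word_list
--
-- 	passed_CN = None
--
-- 	for index in range(len(tag_list)):
-- 		if tag_list[index] == "@CN@" and passed_CN is None:
-- 			passed_CN = index
-- 			content_tags = tag_list[index+1:]
-- 			content = word_list[index+1:]
-- 		elif passed_CN is None and tag_list[index] == "V":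
-- 			verb_begin = word_list[index].replace("_", " ")
-- 		# elif passed_CN and re.match(r"[CENP]", tag_list[index][0]):
-- 		# 	content_tags = tag_list[index:]
-- 		# 	content = word_list[index:]
-- 		# 	break
-- 		elif passed_CN is not None and passed_CN == index - 1 and word_list[index] == ",":
-- 			content_tags = tag_list[index+1:]
-- 			content = word_list[index+1:]
-- 			break
-- 		elif passed_CN is not None and passed_CN < index - 1:
-- 			break
--
-- 	if passed_CN is None:
-- 		verb_begin = None
--
-- 	return verb_begin, content_tags, content
-- ===== SOURCE B (Python) =====
-- def split_contents(word_list, tag_list, tag_string):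
-- 	try:
-- 		i = tag_list.index("@CN@")
-- 	except ValueError:
-- 		return None, tag_list, word_list
--
-- 	verb_begin = None
-- 	for pos in range(i - 1, -1, -1):
-- 		if tag_list[pos] == "V":
-- 			verb_begin = word_list[pos].replace("_", " ")
-- 			break
--
-- 	split = i + 1
-- 	if i + 1 < len(tag_list) and word_list[i + 1] == ",":
-- 		split = i + 2
--
-- 	return verb_begin, tag_list[split:], word_list[split:]
-- ===== Notes on version B (the rewrite author's own statement) =====
-- stated objective: simpler
-- what changed: Replaces A's single interleaved state-machine loop (passed_CN flag, delayed comma/break logic) with a find-then-process decomposition: locate the first '@CN@' with list.index, scan the prefix backwards for the last 'V', then compute the split point directly.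
import Mathlib
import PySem

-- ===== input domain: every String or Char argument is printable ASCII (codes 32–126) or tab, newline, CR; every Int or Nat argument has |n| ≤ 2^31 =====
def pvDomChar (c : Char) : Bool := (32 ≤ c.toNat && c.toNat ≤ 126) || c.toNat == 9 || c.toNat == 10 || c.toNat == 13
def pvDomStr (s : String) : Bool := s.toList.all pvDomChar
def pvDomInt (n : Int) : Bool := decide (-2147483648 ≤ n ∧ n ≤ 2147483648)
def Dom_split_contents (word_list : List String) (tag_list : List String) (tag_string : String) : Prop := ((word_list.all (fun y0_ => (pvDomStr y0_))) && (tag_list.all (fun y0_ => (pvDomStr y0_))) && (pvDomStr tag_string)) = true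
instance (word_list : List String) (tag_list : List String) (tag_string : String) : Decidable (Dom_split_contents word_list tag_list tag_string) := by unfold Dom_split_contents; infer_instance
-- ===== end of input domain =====

-- ===== PORT A =====
-- B replaces A's interleaved state-machine loop by a find-then-process decomposition (objective: simpler).
-- Literal port of A's for-loop over range(len(tag_list)) as recursion on the index; state
-- (verb_begin, content_tags, content, passed_CN); `none` result = Python IndexError (excluded by Pre_).
def pvLoopA (words tags : List String) (index : Nat) (vb : Option String)
    (ct c : List String) (p : Option Nat) :
    Option (Option String × List String × List String) :=
  if h : index < tags.length then
    if tags[index] = "@CN@" ∧ p = none then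
      pvLoopA words tags (index + 1) vb (tags.drop (index + 1)) (words.drop (index + 1)) (some index)
    else if p = none ∧ tags[index] = "V" then
      match words[index]? with
      | none => none  -- word_list[index] raises IndexError
      | some w => pvLoopA words tags (index + 1) (some (PySem.Str.replace w "_" " ")) ct c p
    else
      match p with
      | none => pvLoopA words tags (index + 1) vb ct c none
      | some k =>
        if k + 1 = index then
          match words[index]? with
          | none => none  -- word_list[index] raises IndexError
          | some w =>
            if w = "," then some (vb, tags.drop (index + 1), words.drop (index + 1))  -- break
            else pvLoopA words tags (index + 1) vb ct c (some k)
        else if k + 1 < index then some (vb, ct, c)  -- break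
        else pvLoopA words tags (index + 1) vb ct c (some k)
  else
    match p with
    | none => some (none, ct, c)  -- "if passed_CN is None: verb_begin = None"
    | some _ => some (vb, ct, c)
  termination_by tags.length - index

def split_contents (word_list : List String) (tag_list : List String) (tag_string : String) :
    Option String × List String × List String :=
  (pvLoopA word_list tag_list 0 none tag_list word_list none).getD (none, [], [])

-- ===== PORT B =====
-- Source B's backward scan "for pos in range(i-1,-1,-1): if tag=='V': ...; break", called with i;
-- word access ported with getD (exact inside Pre_, where the position is always in range).
def pvLastV (words tags : List String) : Nat → Option String
  | 0 => none
  | k + 1 =>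
    if tags.getD k "" = "V" then some (PySem.Str.replace (words.getD k "") "_" " ")
    else pvLastV words tags k

def split_contents_alt (word_list : List String) (tag_list : List String) (tag_string : String) :
    Option String × List String × List String :=
  match PySem.List.index? tag_list "@CN@" with
  | none => (none, tag_list, word_list)  -- ValueError branch
  | some i =>
    let vb := pvLastV word_list tag_list i
    let split := if i + 1 < tag_list.length ∧ word_list.getD (i + 1) "" = "," then i + 2 else i + 1
    (vb, tag_list.drop split, word_list.drop split)

-- ===== PRECONDITION & SPEC =====
-- index of the first "@CN@" tag, or len(tag_list) if there is none
def pvCn (tags : List String) : Nat := (PySem.List.index? tags "@CN@").getD tags.length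

-- Pre_ excludes exactly the inputs on which A raises IndexError: a 'V' tag before the first '@CN@'
-- (or anywhere, if there is no '@CN@') at a position outside word_list, or the position right after
-- '@CN@' being inside tag_list but outside word_list.
def Pre_split_contents (word_list : List String) (tag_list : List String) (tag_string : String) : Prop :=
  (∀ j < pvCn tag_list, tag_list.getD j "" = "V" → j < word_list.length) ∧
  (pvCn tag_list + 1 < tag_list.length → pvCn tag_list + 1 < word_list.length)

instance (word_list : List String) (tag_list : List String) (tag_string : String) :
    Decidable (Pre_split_contents word_list tag_list tag_string) := by
  unfold Pre_split_contents; infer_instance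

def pvWitness_split_contents : List String × List String × String :=
  (["an_h", "b", ",", "d"], ["V", "@CN@", "X", "N"], "")

def Spec_split_contents (word_list : List String) (tag_list : List String) (tag_string : String) (out : Option String × List String × List String) : Prop := out = split_contents_alt word_list tag_list tag_string
instance (word_list : List String) (tag_list : List String) (tag_string : String) (out : Option String × List String × List String) : Decidable (Spec_split_contents word_list tag_list tag_string out) := by unfold Spec_split_contents; infer_instance

-- ===== CLAIM (what is proved, stated in full; the proofs are below) =====
def Claim_equal_split_contents : Prop := ∀ (word_list : List String) (tag_list : List String) (tag_string : String), Dom_split_contents word_list tag_list tag_string → Pre_split_contents word_list tag_list tag_string → Spec_split_contents word_list tag_list tag_string (split_contents word_list tag_list tag_string)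

-- ===== LEMMAS AND PROOFS =====

-- pvLastV with a lower bound lo on the scanned positions (proof device for the induction)
def pvBscan (words tags : List String) (lo : Nat) : Nat → Option String
  | 0 => none
  | k + 1 =>
    if k < lo then none
    else if tags.getD k "" = "V" then some (PySem.Str.replace (words.getD k "") "_" " ")
    else pvBscan words tags lo k

theorem pvBscan_zero (words tags : List String) (k : Nat) :
    pvBscan words tags 0 k = pvLastV words tags k := by
  induction k with
  | zero => rfl
  | succ k ih => simp [pvBscan, pvLastV, ih]

theorem pvBscan_ge (words tags : List String) {lo k : Nat} (h : k ≤ lo) :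
    pvBscan words tags lo k = none := by
  cases k with
  | zero => rfl
  | succ k => simp [pvBscan, Nat.lt_of_succ_le h]

theorem pvBscan_lower (words tags : List String) {lo k : Nat} (h : lo < k) :
    pvBscan words tags lo k =
      ((pvBscan words tags (lo + 1) k).or
        (if tags.getD lo "" = "V" then some (PySem.Str.replace (words.getD lo "") "_" " ")
         else none)) := by
  induction k with
  | zero => omega
  | succ k ih =>
    rcases Nat.lt_or_ge lo k with hlt | hge
    · have hk : ¬ k < lo := by omega
      have hk' : ¬ k < lo + 1 := by omega
      simp only [pvBscan, if_neg hk, if_neg hk']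
      by_cases hv : tags.getD k "" = "V"
      · rw [if_pos hv, if_pos hv, Option.some_or]
      · rw [if_neg hv, if_neg hv, ih hlt]
    · have hek : lo = k := by omega
      subst hek
      simp only [pvBscan, if_neg (by omega : ¬ lo < lo)]
      rw [if_pos (Nat.lt_succ_self lo), Option.none_or,
        pvBscan_ge words tags (Nat.le_refl lo)]

-- once broken out of the active region (index > passed_CN + 1), the loop returns its state
theorem pvLoopA_break (words tags : List String) (index : Nat) (vb : Option String)
    (ct c : List String) (k : Nat) (h : k + 1 < index) :
    pvLoopA words tags index vb ct c (some k) = some (vb, ct, c) := by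
  rw [pvLoopA]
  by_cases hlen : index < tags.length
  · have h1 : ¬ (tags[index] = "@CN@" ∧ (some k : Option Nat) = none) := by simp
    have h3 : ¬ (k + 1 = index) := by omega
    simp [hlen, h1, h3, h]
  · simp [hlen]

-- behaviour of the loop from the step right after the first "@CN@"
theorem pvLoopA_after (words tags : List String) (cn : Nat) (vb : Option String)
    (hP2 : cn + 1 < tags.length → cn + 1 < words.length) :
    pvLoopA words tags (cn + 1) vb (tags.drop (cn + 1)) (words.drop (cn + 1)) (some cn) =
      some (vb,
        tags.drop (if cn + 1 < tags.length ∧ words.getD (cn + 1) "" = "," then cn + 2 else cn + 1),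
        words.drop (if cn + 1 < tags.length ∧ words.getD (cn + 1) "" = "," then cn + 2 else cn + 1)) := by
  rw [pvLoopA]
  by_cases hlen : cn + 1 < tags.length
  · have hw : cn + 1 < words.length := hP2 hlen
    have hget : words[cn + 1]? = some (words.getD (cn + 1) "") := by
      simp [List.getElem?_eq_getElem hw]
    have h1 : ¬ (tags[cn + 1]'hlen = "@CN@" ∧ (some cn : Option Nat) = none) := by simp
    rw [dif_pos hlen, if_neg h1,
      if_neg (by simp : ¬ ((some cn : Option Nat) = none ∧ tags[cn + 1]'hlen = "V"))]
    simp only [hget]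
    rw [if_pos trivial]
    by_cases hc : words.getD (cn + 1) "" = ","
    · rw [if_pos hc, if_pos ⟨hlen, hc⟩]
    · rw [if_neg hc, if_neg (fun hx => hc hx.2),
        pvLoopA_break words tags (cn + 2) vb _ _ cn (by omega)]
  · rw [dif_neg hlen, if_neg (fun hx : cn + 1 < tags.length ∧ _ => hlen hx.1)]

-- the pre-"@CN@" phase: forward accumulation of the last 'V' equals the backward scan
theorem pvLoopA_pre (words tags : List String) (cn : Nat)
    (hcn : cn < tags.length) (htag : tags.getD cn "" = "@CN@")
    (hbef : ∀ j, j < cn → tags.getD j "" ≠ "@CN@")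
    (hP2 : cn + 1 < tags.length → cn + 1 < words.length) :
    ∀ n idx vb, idx ≤ cn → cn - idx ≤ n →
      (∀ j, idx ≤ j → j < cn → tags.getD j "" = "V" → j < words.length) →
      pvLoopA words tags idx vb tags words none =
        some ((pvBscan words tags idx cn).or vb,
          tags.drop (if cn + 1 < tags.length ∧ words.getD (cn + 1) "" = "," then cn + 2 else cn + 1),
          words.drop (if cn + 1 < tags.length ∧ words.getD (cn + 1) "" = "," then cn + 2 else cn + 1)) := by
  intro n
  induction n with
  | zero =>
    intro idx vb hle hfuel _
    have heq : idx = cn := by omega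
    subst heq
    rw [pvLoopA]
    have ht : tags[idx] = "@CN@" := by
      rw [← List.getD_eq_getElem tags "" hcn]; exact htag
    simp [hcn, ht, pvLoopA_after words tags idx vb hP2, pvBscan_ge words tags (Nat.le_refl idx)]
  | succ n ih =>
    intro idx vb hle hfuel hacc
    rcases Nat.lt_or_ge idx cn with hlt | hge
    · have hlen : idx < tags.length := Nat.lt_trans hlt hcn
      have ht : tags[idx]'hlen = tags.getD idx "" := (List.getD_eq_getElem tags "" hlen).symm
      have hacc' : ∀ j, idx + 1 ≤ j → j < cn → tags.getD j "" = "V" → j < words.length := by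
        intro j h1j h2j; exact hacc j (by omega) h2j
      by_cases hv : tags.getD idx "" = "V"
      · have hw : idx < words.length := hacc idx (Nat.le_refl idx) hlt hv
        have hget : words[idx]? = some (words.getD idx "") := by
          simp [List.getElem?_eq_getElem hw]
        rw [pvLoopA]
        simp only [hlen, dif_pos, ht, hv, and_true, if_pos, hget, hbef idx hlt, false_and, if_false]
        rw [ih (idx + 1) (some (PySem.Str.replace (words.getD idx "") "_" " ")) (by omega) (by omega) hacc',
          pvBscan_lower words tags hlt, hv]
        simp
      · rw [pvLoopA]
        simp only [hlen, dif_pos, ht, hv, and_false, if_false, hbef idx hlt, false_and]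
        rw [ih (idx + 1) vb (by omega) (by omega) hacc', pvBscan_lower words tags hlt,
          if_neg hv, Option.or_none]
    · have heq : idx = cn := by omega
      subst heq
      rw [pvLoopA]
      have ht : tags[idx] = "@CN@" := by
        rw [← List.getD_eq_getElem tags "" hcn]; exact htag
      simp [hcn, ht, pvLoopA_after words tags idx vb hP2, pvBscan_ge words tags (Nat.le_refl idx)]

-- no "@CN@" at all: the loop returns (None, tag_list, word_list)
theorem pvLoopA_nocn (words tags : List String)
    (hno : ∀ j, j < tags.length → tags.getD j "" ≠ "@CN@")
    (hacc : ∀ j, j < tags.length → tags.getD j "" = "V" → j < words.length) :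
    ∀ n idx vb, tags.length - idx ≤ n →
      pvLoopA words tags idx vb tags words none = some (none, tags, words) := by
  intro n
  induction n with
  | zero =>
    intro idx vb hfuel
    have hlen : ¬ idx < tags.length := by omega
    rw [pvLoopA]; simp [hlen]
  | succ n ih =>
    intro idx vb hfuel
    by_cases hlen : idx < tags.length
    · have ht : tags[idx]'hlen = tags.getD idx "" := (List.getD_eq_getElem tags "" hlen).symm
      by_cases hv : tags.getD idx "" = "V"
      · have hw : idx < words.length := hacc idx hlen hv
        have hget : words[idx]? = some (words.getD idx "") := by
          simp [List.getElem?_eq_getElem hw]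
        rw [pvLoopA]
        simp only [hlen, dif_pos, ht, hv, and_true, if_pos, hget, hno idx hlen, false_and, if_false]
        exact ih (idx + 1) _ (by omega)
      · rw [pvLoopA]
        simp only [hlen, dif_pos, ht, hv, and_false, if_false, hno idx hlen, false_and]
        exact ih (idx + 1) vb (by omega)
    · rw [pvLoopA]; simp [hlen]

-- ===== VERDICT (by name: the statement is the Claim_ definition above) =====
theorem split_contents_spec : Claim_equal_split_contents := by
  intro word_list tag_list tag_string _ hpre
  obtain ⟨hP1, hP2⟩ := hpre
  unfold Spec_split_contents split_contents split_contents_alt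
  by_cases hm : "@CN@" ∈ tag_list
  · have hsome : (PySem.List.index? tag_list "@CN@").isSome := by
      rw [PySem.List.index?_isSome_iff]; exact hm
    obtain ⟨k, hk⟩ := Option.isSome_iff_exists.mp hsome
    obtain ⟨hklen, hkget, hkbef⟩ := PySem.List.getElem_of_index?_eq_some hk
    have hcnk : pvCn tag_list = k := by unfold pvCn; rw [hk]; rfl
    rw [hcnk] at hP1 hP2
    have htag : tag_list.getD k "" = "@CN@" := by
      rw [List.getD_eq_getElem tag_list "" hklen]; exact hkget
    have hbef : ∀ j, j < k → tag_list.getD j "" ≠ "@CN@" := by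
      intro j hj
      have hjlen : j < tag_list.length := Nat.lt_trans hj hklen
      rw [List.getD_eq_getElem tag_list "" hjlen]
      exact hkbef j hj
    rw [pvLoopA_pre word_list tag_list k hklen htag hbef hP2 k 0 none (by omega) (by omega)
      (fun j _ hj hv => hP1 j hj hv)]
    rw [hk]
    simp [pvBscan_zero]
  · have hnone : PySem.List.index? tag_list "@CN@" = none := by
      rw [PySem.List.index?_eq_none_iff]; exact hm
    have hcnl : pvCn tag_list = tag_list.length := by unfold pvCn; rw [hnone]; rfl
    rw [hcnl] at hP1
    have hno : ∀ j, j < tag_list.length → tag_list.getD j "" ≠ "@CN@" := by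
      intro j hj
      rw [List.getD_eq_getElem tag_list "" hj]
      intro hcontra
      exact hm (hcontra ▸ List.getElem_mem hj)
    rw [pvLoopA_nocn word_list tag_list hno hP1 tag_list.length 0 none (by omega), hnone]
    rfl
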